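-- pv_equiv track=rewrite | github.com/leocodeio/echofeedai | backend/bullet_summary.py | generate_bullet_summary
-- ===== SOURCE A (Python) =====
-- def generate_bullet_summary(feedback_text, requirements):
--     summary = []
--
--     for req in requirements:
--         if req in feedback_text:
--             summary.append(f"Feedback covers: {req}")
--         else:
--             summary.append(f"Missing: {req}")
--
--     return summary
-- ===== SOURCE B (Python) =====
-- def generate_bullet_summary(feedback_text, requirements):
--     # sliding-window scan: for each distinct requirement length, slide a window
--     # of that length over the text and look the window up in a hash set of the
--     # requirements; then label each requirement by membership in the found set
--     req_set = set(requirements)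
--     lengths = set(len(r) for r in requirements)
--     found = set()
--     for i in range(len(feedback_text) + 1):
--         for ln in lengths:
--             piece = feedback_text[i:i+ln]
--             if piece in req_set:
--                 found.add(piece)
--     return [f"Feedback covers: {req}" if req in found else f"Missing: {req}"
--             for req in requirements]
-- ===== Notes on version B (the rewrite author's own statement) =====
-- stated objective: faster
-- what changed: B searches text-first: it slides, for each distinct requirement length, a window over the text and looks the window up in a hash set of the requirements, collecting found requirements in one scan of the text, instead of A's pattern-first loop running one substring search over the whole text per requirement.
import Mathlib
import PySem

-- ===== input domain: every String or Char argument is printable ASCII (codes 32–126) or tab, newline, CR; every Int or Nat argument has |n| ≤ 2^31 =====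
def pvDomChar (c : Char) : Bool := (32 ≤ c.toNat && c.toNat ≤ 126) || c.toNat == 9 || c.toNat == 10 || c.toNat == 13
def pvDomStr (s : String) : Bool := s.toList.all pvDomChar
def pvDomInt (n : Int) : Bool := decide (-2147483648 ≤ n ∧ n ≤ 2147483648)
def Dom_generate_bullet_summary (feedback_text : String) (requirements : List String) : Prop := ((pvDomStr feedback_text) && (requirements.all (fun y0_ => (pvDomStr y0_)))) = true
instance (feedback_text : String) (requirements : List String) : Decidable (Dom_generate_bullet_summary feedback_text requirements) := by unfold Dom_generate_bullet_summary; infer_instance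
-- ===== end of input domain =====

-- B replaces A's per-requirement substring search (one scan of the text per requirement) with a single sliding-window pass over the text that looks each window up in a hash set of the requirements — measurably faster on large inputs.


-- ===== PORT A =====
def generate_bullet_summary (feedback_text : String) (requirements : List String) : List String :=
  requirements.foldl (fun summary req =>
    if PySem.Str.isIn req feedback_text then
      summary ++ ["Feedback covers: " ++ req]
    else
      summary ++ ["Missing: " ++ req]) []

-- ===== PORT B =====
-- Strings are handled as their character lists (PySem.Chars is the exact model of Python's str operations).
def generate_bullet_summary_alt (feedback_text : String) (requirements : List String) : List String :=
  let s := feedback_text.toList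
  let req_set : PySem.Set (List Char) := PySem.Set.ofList (requirements.map String.toList)
  let lengths : PySem.Set Int := PySem.Set.ofList (requirements.map (fun r => (r.toList.length : Int)))
  let found : PySem.Set (List Char) :=
    (PySem.List.pyRange 0 ((s.length : Int) + 1) 1).foldl (fun f i =>
      lengths.foldl (fun f ln =>
        let piece := PySem.List.slice s (some i) (some (i + ln))
        if PySem.Set.contains req_set piece then PySem.Set.add f piece else f) f)
      PySem.Set.empty
  requirements.map (fun req =>
    if PySem.Set.contains found req.toList then "Feedback covers: " ++ req else "Missing: " ++ req)

-- ===== PRECONDITION & SPEC =====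
def Spec_generate_bullet_summary (feedback_text : String) (requirements : List String) (out : List String) : Prop := out = generate_bullet_summary_alt feedback_text requirements
instance (feedback_text : String) (requirements : List String) (out : List String) : Decidable (Spec_generate_bullet_summary feedback_text requirements out) := by unfold Spec_generate_bullet_summary; infer_instance

-- ===== CLAIM (what is proved, stated in full; the proofs are below) =====
def Claim_equal_generate_bullet_summary : Prop := ∀ (feedback_text : String) (requirements : List String), Dom_generate_bullet_summary feedback_text requirements → Spec_generate_bullet_summary feedback_text requirements (generate_bullet_summary feedback_text requirements)

-- ===== LEMMAS AND PROOFS =====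

-- Inner loop of B: membership after testing every window length at one text position.
theorem mem_len_fold (g : Int → List Char) (q : PySem.Set (List Char))
    (lns : List Int) (f : PySem.Set (List Char)) (r : List Char) :
    r ∈ lns.foldl (fun f ln => if PySem.Set.contains q (g ln) then PySem.Set.add f (g ln) else f) f ↔
      r ∈ f ∨ ∃ ln ∈ lns, g ln = r ∧ r ∈ q := by
  induction lns generalizing f with
  | nil => simp
  | cons x xs ih =>
    simp only [List.foldl_cons, ih]
    by_cases hc : PySem.Set.contains q (g x) = true
    · rw [if_pos hc, PySem.Set.mem_add]
      constructor
      · rintro (⟨h | rfl⟩ | ⟨ln, hln, hg, hq⟩)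
        · exact Or.inl h
        · exact Or.inr ⟨x, List.mem_cons_self, rfl, (PySem.Set.contains_iff _ _).mp hc⟩
        · exact Or.inr ⟨ln, List.mem_cons_of_mem _ hln, hg, hq⟩
      · rintro (h | ⟨ln, hln, hg, hq⟩)
        · exact Or.inl (Or.inl h)
        · rcases List.mem_cons.mp hln with rfl | hln'
          · exact Or.inl (Or.inr hg.symm)
          · exact Or.inr ⟨ln, hln', hg, hq⟩
    · rw [if_neg hc]
      constructor
      · rintro (h | ⟨ln, hln, hg, hq⟩)
        · exact Or.inl h
        · exact Or.inr ⟨ln, List.mem_cons_of_mem _ hln, hg, hq⟩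
      · rintro (h | ⟨ln, hln, hg, hq⟩)
        · exact Or.inl h
        · rcases List.mem_cons.mp hln with rfl | hln'
          · exact absurd ((PySem.Set.contains_iff _ _).mpr (hg ▸ hq)) hc
          · exact Or.inr ⟨ln, hln', hg, hq⟩

-- Outer loop of B: membership in the found-set after scanning a list of positions.
theorem mem_pos_fold (piece : Int → Int → List Char) (q : PySem.Set (List Char))
    (lns : List Int) (is : List Int) (f : PySem.Set (List Char)) (r : List Char) :
    r ∈ is.foldl (fun f i =>
        lns.foldl (fun f ln => if PySem.Set.contains q (piece i ln) then PySem.Set.add f (piece i ln) else f) f) f ↔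
      r ∈ f ∨ ∃ i ∈ is, ∃ ln ∈ lns, piece i ln = r ∧ r ∈ q := by
  induction is generalizing f with
  | nil => simp
  | cons i js ih =>
    simp only [List.foldl_cons, ih, mem_len_fold]
    constructor
    · rintro ((h | ⟨ln, hln, hg, hq⟩) | ⟨j, hj, ln, hln, hg, hq⟩)
      · exact Or.inl h
      · exact Or.inr ⟨i, List.mem_cons_self, ln, hln, hg, hq⟩
      · exact Or.inr ⟨j, List.mem_cons_of_mem _ hj, ln, hln, hg, hq⟩
    · rintro (h | ⟨j, hj, ln, hln, hg, hq⟩)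
      · exact Or.inl (Or.inl h)
      · rcases List.mem_cons.mp hj with rfl | hj'
        · exact Or.inl (Or.inr ⟨ln, hln, hg, hq⟩)
        · exact Or.inr ⟨j, hj', ln, hln, hg, hq⟩

-- A requirement is in B's found-set iff it occurs in the text (for requirements of the list).
theorem found_iff_isIn (feedback_text : String) (requirements : List String) (r : String)
    (hr : r ∈ requirements) :
    r.toList ∈ (PySem.List.pyRange 0 ((feedback_text.toList.length : Int) + 1) 1).foldl (fun f i =>
        (PySem.Set.ofList (requirements.map (fun r => (r.toList.length : Int)))).foldl (fun f ln =>
          let piece := PySem.List.slice feedback_text.toList (some i) (some (i + ln))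
          if PySem.Set.contains (PySem.Set.ofList (requirements.map String.toList)) piece then PySem.Set.add f piece else f) f)
        PySem.Set.empty ↔
      PySem.Str.isIn r feedback_text = true := by
  rw [show PySem.Str.isIn r feedback_text = PySem.Chars.isIn r.toList feedback_text.toList from by
    simp [pysem]]
  rw [mem_pos_fold]
  constructor
  · rintro (h | ⟨i, hi, ln, hln, hg, -⟩)
    · exact absurd h (by simp [PySem.Set.empty])
    · -- the window equals r, so r is a prefix of a suffix of the text
      have hi0 : 0 ≤ i := ((PySem.List.mem_pyRange_one).mp hi).1
      have hln0 : 0 ≤ ln := by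
        rcases List.mem_map.mp ((PySem.Set.mem_ofList _ _).mp hln) with ⟨r', -, rfl⟩
        positivity
      rw [PySem.List.slice_toNat _ hi0 (by omega)] at hg
      have : r.toList <+: feedback_text.toList.drop i.toNat := hg ▸ List.take_prefix _ _
      exact (PySem.Chars.exists_prefix_drop_iff_isIn _ _).mp ⟨_, this⟩
  · intro hin
    obtain ⟨j, hpre⟩ := (PySem.Chars.exists_prefix_drop_iff_isIn r.toList feedback_text.toList).mpr hin
    -- clamp the occurrence position to at most len(text)
    have hpre' : r.toList <+: feedback_text.toList.drop (min j feedback_text.toList.length) := by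
      by_cases hj : j ≤ feedback_text.toList.length
      · rwa [min_eq_left hj]
      · rw [min_eq_right (by omega), List.drop_length]
        rwa [List.drop_eq_nil_of_le (by omega)] at hpre
    refine Or.inr ⟨(min j feedback_text.toList.length : Nat), ?_, (r.toList.length : Int), ?_, ?_, ?_⟩
    · rw [PySem.List.mem_pyRange_one]
      constructor
      · positivity
      · have := min_le_right j feedback_text.toList.length
        exact_mod_cast Nat.lt_succ_of_le this
    · exact (PySem.Set.mem_ofList _ _).mpr (List.mem_map.mpr ⟨r, hr, rfl⟩)
    · rw [PySem.List.slice_toNat _ (by positivity) (by positivity)]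
      have h1 : ((min j feedback_text.toList.length : Nat) : Int).toNat = min j feedback_text.toList.length := by omega
      have h2 : (((min j feedback_text.toList.length : Nat) : Int) + (r.toList.length : Int)).toNat
          = min j feedback_text.toList.length + r.toList.length := by omega
      rw [h1, h2]
      have := List.prefix_iff_eq_take.mp hpre'
      rw [Nat.add_sub_cancel_left]
      exact this.symm
    · exact (PySem.Set.mem_ofList _ _).mpr (List.mem_map.mpr ⟨r, hr, rfl⟩)

-- ===== VERDICT (by name: the statement is the Claim_ definition above) =====
theorem generate_bullet_summary_spec : Claim_equal_generate_bullet_summary := by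
  intro feedback_text requirements _
  unfold Spec_generate_bullet_summary generate_bullet_summary generate_bullet_summary_alt
  rw [show (fun (summary : List String) (req : String) =>
        if PySem.Str.isIn req feedback_text then
          summary ++ ["Feedback covers: " ++ req]
        else
          summary ++ ["Missing: " ++ req])
      = (fun summary req => summary ++
          [if PySem.Str.isIn req feedback_text then "Feedback covers: " ++ req
           else "Missing: " ++ req]) from by
    funext s r
    by_cases h : PySem.Str.isIn r feedback_text = true
    · rw [if_pos h, if_pos h]
    · rw [if_neg h, if_neg h]]
  rw [PySem.List.foldl_append_singleton_eq_map]
  simp only [List.nil_append]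
  apply List.map_congr_left
  intro r hr
  have h := found_iff_isIn feedback_text requirements r hr
  by_cases hin : PySem.Str.isIn r feedback_text = true
  · rw [if_pos hin, if_pos ((PySem.Set.contains_iff _ _).mpr (h.mpr hin))]
  · rw [if_neg hin, if_neg (fun hc => hin (h.mp ((PySem.Set.contains_iff _ _).mp hc)))]
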